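-- pv_equiv track=rewrite | github.com/osrswiki/osrswiki-android | tools/js/deploy/compatibility_stripper.py | detect_compatibility_boundaries
-- ===== SOURCE A (Python) =====
-- from typing import List, Optional, Tuple
--
-- def detect_compatibility_boundaries(content: str) -> Tuple[int, int]:
--     """Detect start and end of embedded compatibility layer."""
--     lines = content.split('\n')
--
--     # Find start of compatibility layer (usually starts with MediaWiki comment)
--     start_line = -1
--     for i, line in enumerate(lines):
--         stripped = line.strip()
--         if (stripped.startswith('// MediaWiki API Compatibility') or
--             stripped.startswith('if (typeof window.mw === \'undefined\')')):
--             start_line = i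
--             break
--
--     if start_line == -1:
--         return -1, -1  # No compatibility layer found
--
--     # Find end of compatibility layer (look for "// Adapted module:" comment)
--     end_line = -1
--     for i in range(start_line, len(lines)):
--         stripped = lines[i].strip()
--         if stripped.startswith('// Adapted module:'):
--             end_line = i - 1  # End before the module comment
--             break
--
--     # If no "Adapted module" comment, look for start of IIFE pattern
--     if end_line == -1:
--         for i in range(start_line, len(lines)):
--             stripped = lines[i].strip()
--             if stripped == '(function() {' or stripped.startswith('(function()'):
--                 # Found IIFE start, compatibility layer ends before this
--                 end_line = i - 1
--                 break
--
--     # Fallback: look for jQuery compatibility ending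
--     if end_line == -1:
--         for i in range(start_line, len(lines)):
--             stripped = lines[i].strip()
--             if 'window.jQuery = window.$;' in stripped:
--                 # Found end of jQuery compatibility, look a few lines ahead
--                 for j in range(i + 1, min(i + 5, len(lines))):
--                     if lines[j].strip() == '':
--                         end_line = j
--                         break
--                 break
--
--     return start_line, end_line
-- ===== SOURCE B (Python) =====
-- def detect_compatibility_boundaries(content):
--     """Detect start and end of embedded compatibility layer (single-pass marker scan)."""
--     lines = content.split('\n')
--     start_line = next((i for i, line in enumerate(lines)
--                        if line.strip().startswith('// MediaWiki API Compatibility')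
--                        or line.strip().startswith("if (typeof window.mw === 'undefined')")), -1)
--     if start_line == -1:
--         return -1, -1
--     idx_adapted = idx_iife = idx_jquery = None
--     for i in range(start_line, len(lines)):
--         s = lines[i].strip()
--         if idx_adapted is None and s.startswith('// Adapted module:'):
--             idx_adapted = i
--         if idx_iife is None and (s == '(function() {' or s.startswith('(function()')):
--             idx_iife = i
--         if idx_jquery is None and 'window.jQuery = window.$;' in s:
--             idx_jquery = i
--     if idx_adapted is not None:
--         return start_line, idx_adapted - 1
--     if idx_iife is not None:
--         return start_line, idx_iife - 1
--     if idx_jquery is not None: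
--         end_line = -1
--         for j in range(idx_jquery + 1, min(idx_jquery + 5, len(lines))):
--             if lines[j].strip() == '':
--                 end_line = j
--                 break
--         return start_line, end_line
--     return start_line, -1
-- ===== Notes on version B (the rewrite author's own statement) =====
-- stated objective: alternative
-- what changed: A rescans lines[start:] up to three times, one full pass per end-marker type in priority order; B makes a single pass over lines[start:] recording the first index of each of the three end-marker types at once and applies the priority (adapted > IIFE > jQuery-plus-blank-lookahead) only afterwards.
import Mathlib
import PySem

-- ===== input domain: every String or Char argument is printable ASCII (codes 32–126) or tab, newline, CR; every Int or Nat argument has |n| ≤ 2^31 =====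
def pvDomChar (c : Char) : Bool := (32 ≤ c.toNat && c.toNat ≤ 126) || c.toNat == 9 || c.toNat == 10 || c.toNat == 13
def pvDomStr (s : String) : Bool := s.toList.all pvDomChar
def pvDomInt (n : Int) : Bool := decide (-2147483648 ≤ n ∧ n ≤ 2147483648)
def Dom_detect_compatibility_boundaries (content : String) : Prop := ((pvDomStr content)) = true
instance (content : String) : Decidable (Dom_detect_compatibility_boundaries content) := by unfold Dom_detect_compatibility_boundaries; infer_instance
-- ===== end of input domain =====

-- B replaces A's three priority-ordered rescans of lines[start:] by one pass recording the first
-- index of each end-marker type, then applies the priority once (objective: alternative decomposition).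

-- ===== PORT A =====

-- the start-of-layer test (shared text predicate)
def pvStartPred (stripped : String) : Bool :=
  PySem.Str.startswith stripped "// MediaWiki API Compatibility" ||
  PySem.Str.startswith stripped "if (typeof window.mw === 'undefined')"

-- A's first loop: 'for i, line in enumerate(lines): … break'
def aFindStart : List String → Int → Int
  | [], _ => -1
  | line :: rest, i =>
    if pvStartPred (PySem.Str.strip line) then i else aFindStart rest (i + 1)

-- A's second loop: first i in idxs with stripped.startswith('// Adapted module:'), giving i-1
def aScanAdapted (lines : List String) : List Int → Int
  | [] => -1
  | i :: rest =>
    if PySem.Str.startswith (PySem.Str.strip (PySem.List.pyGetD lines i "")) "// Adapted module:" then i - 1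
    else aScanAdapted lines rest

-- A's third loop: IIFE pattern
def aScanIife (lines : List String) : List Int → Int
  | [] => -1
  | i :: rest =>
    let stripped := PySem.Str.strip (PySem.List.pyGetD lines i "")
    if stripped == "(function() {" || PySem.Str.startswith stripped "(function()" then i - 1
    else aScanIife lines rest

-- A's inner look-ahead: first blank line among idxs (else -1)
def aInnerBlank (lines : List String) : List Int → Int
  | [] => -1
  | j :: rest =>
    if PySem.Str.strip (PySem.List.pyGetD lines j "") == "" then j else aInnerBlank lines rest

-- A's fourth loop: jQuery marker, then the look-ahead window
def aScanJquery (lines : List String) : List Int → Int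
  | [] => -1
  | i :: rest =>
    if PySem.Str.isIn "window.jQuery = window.$;" (PySem.Str.strip (PySem.List.pyGetD lines i "")) then
      aInnerBlank lines (PySem.List.pyRange (i + 1) (min (i + 5) (lines.length : Int)) 1)
    else aScanJquery lines rest

def detect_compatibility_boundaries (content : String) : Int × Int :=
  let lines := (PySem.Str.split? content "\n").getD []
  let start_line := aFindStart lines 0
  if start_line == -1 then (-1, -1)
  else
    let idxs := PySem.List.pyRange start_line (lines.length : Int) 1
    let end1 := aScanAdapted lines idxs
    let end2 := if end1 == -1 then aScanIife lines idxs else end1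
    let end3 := if end2 == -1 then aScanJquery lines idxs else end2
    (start_line, end3)

-- ===== PORT B =====

-- B's single pass: record the first index of each of the three end-marker types
def bPass (lines : List String) : List Int → Option Int × Option Int × Option Int → Option Int × Option Int × Option Int
  | [], st => st
  | i :: rest, (a, f, j) =>
    let s := PySem.Str.strip (PySem.List.pyGetD lines i "")
    bPass lines rest
      ((if a.isNone && PySem.Str.startswith s "// Adapted module:" then some i else a),
       (if f.isNone && (s == "(function() {" || PySem.Str.startswith s "(function()") then some i else f),
       (if j.isNone && PySem.Str.isIn "window.jQuery = window.$;" s then some i else j))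

-- B's blank-line look-ahead after the jQuery marker
def bBlank (lines : List String) : List Int → Int
  | [] => -1
  | j :: rest =>
    if PySem.Str.strip (PySem.List.pyGetD lines j "") == "" then j else bBlank lines rest

def detect_compatibility_boundaries_alt (content : String) : Int × Int :=
  let lines := (PySem.Str.split? content "\n").getD []
  let start_line :=
    ((PySem.List.enumerate lines).find? (fun p => pvStartPred (PySem.Str.strip p.2))).elim (-1) (·.1)
  if start_line == -1 then (-1, -1)
  else
    match bPass lines (PySem.List.pyRange start_line (lines.length : Int) 1) (none, none, none) with
    | (some i, _, _) => (start_line, i - 1)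
    | (none, some i, _) => (start_line, i - 1)
    | (none, none, some i) =>
        (start_line, bBlank lines (PySem.List.pyRange (i + 1) (min (i + 5) (lines.length : Int)) 1))
    | (none, none, none) => (start_line, -1)

-- ===== PRECONDITION & SPEC =====
def Spec_detect_compatibility_boundaries (content : String) (out : Int × Int) : Prop := out = detect_compatibility_boundaries_alt content
instance (content : String) (out : Int × Int) : Decidable (Spec_detect_compatibility_boundaries content out) := by unfold Spec_detect_compatibility_boundaries; infer_instance

-- ===== CLAIM (what is proved, stated in full; the proofs are below) =====
def Claim_equal_detect_compatibility_boundaries : Prop := ∀ (content : String), Dom_detect_compatibility_boundaries content → Spec_detect_compatibility_boundaries content (detect_compatibility_boundaries content)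

-- ===== LEMMAS AND PROOFS =====

-- the per-index end-marker predicates, as find?-style tests
def qAdapted (lines : List String) (i : Int) : Bool :=
  PySem.Str.startswith (PySem.Str.strip (PySem.List.pyGetD lines i "")) "// Adapted module:"
def qIife (lines : List String) (i : Int) : Bool :=
  PySem.Str.strip (PySem.List.pyGetD lines i "") == "(function() {" ||
  PySem.Str.startswith (PySem.Str.strip (PySem.List.pyGetD lines i "")) "(function()"
def qJquery (lines : List String) (i : Int) : Bool :=
  PySem.Str.isIn "window.jQuery = window.$;" (PySem.Str.strip (PySem.List.pyGetD lines i ""))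

theorem aScanAdapted_eq (lines : List String) (idxs : List Int) :
    aScanAdapted lines idxs = (idxs.find? (qAdapted lines)).elim (-1) (· - 1) := by
  induction idxs with
  | nil => rfl
  | cons i rest ih =>
    simp only [aScanAdapted, List.find?_cons, qAdapted]
    cases h : PySem.Str.startswith (PySem.Str.strip (PySem.List.pyGetD lines i "")) "// Adapted module:" <;>
      simp [h, ih]

theorem aScanIife_eq (lines : List String) (idxs : List Int) :
    aScanIife lines idxs = (idxs.find? (qIife lines)).elim (-1) (· - 1) := by
  induction idxs with
  | nil => rfl
  | cons i rest ih =>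
    simp only [aScanIife, List.find?_cons, qIife]
    cases h : (PySem.Str.strip (PySem.List.pyGetD lines i "") == "(function() {" ||
        PySem.Str.startswith (PySem.Str.strip (PySem.List.pyGetD lines i "")) "(function()") <;>
      simp [h, ih]

theorem aInnerBlank_eq_bBlank (lines : List String) (idxs : List Int) :
    aInnerBlank lines idxs = bBlank lines idxs := by
  induction idxs with
  | nil => rfl
  | cons j rest ih => simp only [aInnerBlank, bBlank, ih]

theorem aScanJquery_eq (lines : List String) (idxs : List Int) :
    aScanJquery lines idxs = (idxs.find? (qJquery lines)).elim (-1)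
      (fun i => aInnerBlank lines (PySem.List.pyRange (i + 1) (min (i + 5) (lines.length : Int)) 1)) := by
  induction idxs with
  | nil => rfl
  | cons i rest ih =>
    simp only [aScanJquery, List.find?_cons, qJquery]
    cases h : PySem.Str.isIn "window.jQuery = window.$;" (PySem.Str.strip (PySem.List.pyGetD lines i "")) <;>
      simp [h, ih]

theorem bPass_eq (lines : List String) (idxs : List Int) (a f j : Option Int) :
    bPass lines idxs (a, f, j) =
      (a.or (idxs.find? (qAdapted lines)), f.or (idxs.find? (qIife lines)), j.or (idxs.find? (qJquery lines))) := by
  induction idxs generalizing a f j with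
  | nil => simp [bPass]
  | cons i rest ih =>
    simp only [bPass, List.find?_cons, qAdapted, qIife, qJquery, ih]
    cases a <;> cases f <;> cases j <;>
      cases hA : PySem.Str.startswith (PySem.Str.strip (PySem.List.pyGetD lines i "")) "// Adapted module:" <;>
      cases hF : (PySem.Str.strip (PySem.List.pyGetD lines i "") == "(function() {" ||
        PySem.Str.startswith (PySem.Str.strip (PySem.List.pyGetD lines i "")) "(function()") <;>
      cases hJ : PySem.Str.isIn "window.jQuery = window.$;" (PySem.Str.strip (PySem.List.pyGetD lines i "")) <;>
      simp [hA, hF, hJ, Option.or]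

theorem aFindStart_eq (lines : List String) (i : Int) :
    aFindStart lines i =
      ((PySem.List.enumerate lines i).find? (fun p => pvStartPred (PySem.Str.strip p.2))).elim (-1) (·.1) := by
  induction lines generalizing i with
  | nil => simp [aFindStart, PySem.List.enumerate_nil]
  | cons line rest ih =>
    simp only [aFindStart, PySem.List.enumerate_cons, List.find?_cons]
    cases h : pvStartPred (PySem.Str.strip line) <;> simp [h, ih]

-- a line matching the start test cannot itself be an end marker of the Adapted/IIFE kind
theorem start_not_adapted (s : String) (h : pvStartPred s = true) :
    PySem.Str.startswith s "// Adapted module:" = false := by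
  by_contra hc
  rw [Bool.not_eq_false, PySem.Str.startswith_eq, PySem.Chars.startswith_iff] at hc
  rcases Bool.or_eq_true_iff.mp (by simpa [pvStartPred] using h) with h1 | h1 <;>
    rw [PySem.Chars.startswith_iff] at h1 <;>
    rcases List.prefix_or_prefix_of_prefix hc h1 with hp | hp <;> revert hp <;> decide

theorem start_not_iife (s : String) (h : pvStartPred s = true) :
    (s == "(function() {" || PySem.Str.startswith s "(function()") = false := by
  by_contra hc
  rw [Bool.not_eq_false, Bool.or_eq_true_iff] at hc
  rcases hc with hc | hc
  · rw [beq_iff_eq] at hc; subst hc; revert h; decide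
  · rw [PySem.Str.startswith_eq, PySem.Chars.startswith_iff] at hc
    rcases Bool.or_eq_true_iff.mp (by simpa [pvStartPred] using h) with h1 | h1 <;>
      rw [PySem.Chars.startswith_iff] at h1 <;>
      rcases List.prefix_or_prefix_of_prefix hc h1 with hp | hp <;> revert hp <;> decide

-- where aFindStart lands: a nonnegative index whose line passes the start test
theorem aFindStart_spec (lines : List String) (i : Int) (h : aFindStart lines i ≠ -1) :
    ∃ k : Nat, aFindStart lines i = i + k ∧ k < lines.length ∧
      pvStartPred (PySem.Str.strip lines[k]!) = true := by
  induction lines generalizing i with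
  | nil => simp [aFindStart] at h
  | cons line rest ih =>
    simp only [aFindStart] at h ⊢
    by_cases hp : pvStartPred (PySem.Str.strip line) = true
    · exact ⟨0, by simp [hp]⟩
    · rw [Bool.not_eq_true] at hp
      rw [if_neg (by simp [hp])] at h
      obtain ⟨k, hk1, hk2, hk3⟩ := ih (i + 1) h
      exact ⟨k + 1, by rw [if_neg (by simp [hp])]; push_cast; omega, by simpa using hk2, by simpa using hk3⟩

-- ===== VERDICT (by name: the statement is the Claim_ definition above) =====
theorem detect_compatibility_boundaries_spec : Claim_equal_detect_compatibility_boundaries := by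
  intro content _
  unfold Spec_detect_compatibility_boundaries
  unfold detect_compatibility_boundaries detect_compatibility_boundaries_alt
  simp only [aScanAdapted_eq, aScanIife_eq, aScanJquery_eq, aInnerBlank_eq_bBlank, bPass_eq,
    ← aFindStart_eq]
  set lines := (PySem.Str.split? content "\n").getD [] with hl
  by_cases hstart : aFindStart lines 0 = -1
  · simp [hstart]
  · simp only [beq_iff_eq, if_neg hstart]
    obtain ⟨k, hk1, hk2, hk3⟩ := aFindStart_spec lines 0 hstart
    rw [zero_add] at hk1
    have hline0 : k = 0 → PySem.List.pyGetD lines (0 : Int) "" = lines[0]! := by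
      intro h0; subst h0
      rw [PySem.List.pyGetD_zero, List.getD_eq_getElem?_getD, List.getElem?_eq_getElem hk2,
        Option.getD_some, List.getElem!_eq_getElem?_getD, List.getElem?_eq_getElem hk2, Option.getD_some]
    have hne_zero : ∀ m : Int, m ∈ PySem.List.pyRange (aFindStart lines 0) (lines.length : Int) 1 →
        m = 0 → k = 0 := by
      intro m hm h0
      have := PySem.List.mem_pyRange_one.mp hm
      omega
    cases hA : (PySem.List.pyRange (aFindStart lines 0) (lines.length : Int) 1).find? (qAdapted lines) with
    | some m =>
      have hqm : qAdapted lines m = true := List.find?_some hA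
      have hm := List.mem_of_find?_eq_some hA
      have hm0 : m ≠ 0 := by
        intro h0
        have hk0 := hne_zero m hm h0
        rw [h0] at hqm
        unfold qAdapted at hqm
        rw [hline0 hk0] at hqm
        rw [hk0] at hk3
        rw [start_not_adapted _ hk3] at hqm
        simp at hqm
      simp [hA, Option.or, show ¬ (m - 1 = -1) by omega]
    | none =>
      cases hF : (PySem.List.pyRange (aFindStart lines 0) (lines.length : Int) 1).find? (qIife lines) with
      | some m =>
        have hqm : qIife lines m = true := List.find?_some hF
        have hm := List.mem_of_find?_eq_some hF
        have hm0 : m ≠ 0 := by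
          intro h0
          have hk0 := hne_zero m hm h0
          rw [h0] at hqm
          unfold qIife at hqm
          rw [hline0 hk0] at hqm
          rw [hk0] at hk3
          rw [start_not_iife _ hk3] at hqm
          simp at hqm
        simp [hA, hF, Option.or, show ¬ (m - 1 = -1) by omega]
      | none =>
        cases hJ : (PySem.List.pyRange (aFindStart lines 0) (lines.length : Int) 1).find? (qJquery lines) with
        | some m => simp [hA, hF, hJ, Option.or]
        | none => simp [hA, hF, hJ, Option.or]
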